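-- pv_equiv track=rewrite | github.com/Ayushmanglani/competitive_coding | leetcode/Jan_2021/10_CreateSortedArraythroughInstructions.py | createSortedArray
-- ===== SOURCE A (Python) =====
-- from collections import defaultdict
--
-- def createSortedArray(instructions):
--     maxVal = max(instructions)
--     count = defaultdict(int)  # binary indexed tree is 1-indexed/use a dict to save some space
--
--     def add2tree(num):
--         while num <= maxVal:
--             count[num] += 1
--             num += num & -num
--
--     def getTotalSmaller(num):
--         smaller = 0
--         while num > 0:
--             smaller += count[num]
--             num -= num & -num
--         return smaller
--
--     rst = 0
--     for total, num in enumerate(instructions):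
--         total = total + 1
--         add2tree(num)
--         rst += min(getTotalSmaller(num - 1), total - getTotalSmaller(num))
--     return rst % (10**9 + 7)
-- ===== SOURCE B (Python) =====
-- def createSortedArray(instructions):
--     # Direct re-statement of the cost: for each element, count how many of the
--     # earlier elements are strictly smaller / strictly greater and pay the
--     # cheaper side.  No Fenwick tree, no auxiliary structure.
--     total = 0
--     for i, num in enumerate(instructions):
--         prefix = instructions[:i]
--         smaller = sum(1 for x in prefix if x < num)
--         greater = sum(1 for x in prefix if x > num)
--         total += min(smaller, greater)
--     return total % (10 ** 9 + 7)
-- ===== Notes on version B (the rewrite author's own statement) =====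
-- stated objective: simpler
-- what changed: Replaces the dict-backed Fenwick (binary indexed) tree and its bit-twiddling update/query loops by a direct per-element count of strictly smaller and strictly greater predecessors over the prefix.
-- outside the precondition, e.g. on createSortedArray([-3, -5, -4]): A returns 0, B returns 1; on createSortedArray([]): A raises ValueError, B returns 0
import Mathlib
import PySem

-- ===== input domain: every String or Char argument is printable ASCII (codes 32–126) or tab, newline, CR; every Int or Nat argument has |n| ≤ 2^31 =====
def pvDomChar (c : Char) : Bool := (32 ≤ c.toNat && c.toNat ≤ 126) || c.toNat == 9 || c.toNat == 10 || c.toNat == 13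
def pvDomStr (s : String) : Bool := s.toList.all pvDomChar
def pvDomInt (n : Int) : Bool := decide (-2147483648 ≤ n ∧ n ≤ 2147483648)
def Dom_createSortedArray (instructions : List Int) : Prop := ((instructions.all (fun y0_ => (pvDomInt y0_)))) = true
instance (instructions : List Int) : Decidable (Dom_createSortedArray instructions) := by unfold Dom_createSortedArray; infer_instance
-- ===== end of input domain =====

-- B replaces A's dict-backed Fenwick tree by a direct quadratic count of strictly
-- smaller / strictly greater predecessors (objective: simpler; no speed claim).

-- ===== PORT A =====
-- num & -num (Python's bitwise AND on ints)
def pvLow (n : Int) : Int := PySem.Int.band n (-n)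

-- 'def add2tree(num): while num <= maxVal: count[num] += 1; num += num & -num'
-- The while loop is ported with fuel; inside Pre_ every iteration increases num by
-- at least 1, so fuel (maxVal + 1 - num).toNat is an exact upper bound on the
-- iteration count and the fueled loop computes what the Python loop computes.
def pvAdd (maxVal : Int) : Nat → Int → PySem.Dict Int Int → PySem.Dict Int Int
  | 0, _, c => c
  | fuel + 1, num, c =>
    if num ≤ maxVal then pvAdd maxVal fuel (num + pvLow num) (c.modify num 0 (· + 1))
    else c

-- 'def getTotalSmaller(num): smaller = 0; while num > 0: smaller += count[num]; num -= num & -num'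
-- Same fuel scheme: inside Pre_ each iteration decreases num by at least 1, so
-- num.toNat bounds the iteration count.  (The defaultdict read count[num] is
-- ported as getD with default 0; the key it may insert carries value 0 and never
-- changes any later lookup.)
def pvQuery (c : PySem.Dict Int Int) : Nat → Int → Int → Int
  | 0, _, acc => acc
  | fuel + 1, num, acc =>
    if 0 < num then pvQuery c fuel (num - pvLow num) (acc + c.getD num 0) else acc

def createSortedArray (instructions : List Int) : Int :=
  match PySem.List.max? instructions (fun x => x) with
  | none => 0  -- Python: max([]) raises ValueError; outside Pre_
  | some maxVal =>
    let st := (PySem.List.enumerate instructions).foldl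
      (fun (st : PySem.Dict Int Int × Int) p =>
        let c := pvAdd maxVal (maxVal + 1 - p.2).toNat p.2 st.1
        (c, st.2 + min (pvQuery c (p.2 - 1).toNat (p.2 - 1) 0)
                       ((p.1 + 1) - pvQuery c p.2.toNat p.2 0)))
      (PySem.Dict.empty, 0)
    PySem.Int.mod st.2 (1000000007)

-- ===== PORT B =====
def createSortedArray_alt (instructions : List Int) : Int :=
  let total := (PySem.List.enumerate instructions).foldl
    (fun (acc : Int) p =>
      let pfx := PySem.List.slice instructions (some 0) (some p.1)
      acc + min ((pfx.countP (fun x => decide (x < p.2)) : Int))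
                ((pfx.countP (fun x => decide (p.2 < x)) : Int)))
    0
  PySem.Int.mod total (1000000007)

-- ===== PRECONDITION & SPEC =====
-- Pre_ restricts to the function's natural domain (nonempty, all elements ≥ 1, as
-- in the LeetCode statement A solves).  Outside it A never returns a correct value:
-- on [] A raises ValueError; when an element ≤ 0 coexists with max(instructions) ≥ 0
-- A's Fenwick update loop never terminates; and on all-negative lists A's queries
-- never run, so it returns the accidental constant 0 (see cites in claim.json).
def Pre_createSortedArray (instructions : List Int) : Prop :=
  instructions ≠ [] ∧ ∀ x ∈ instructions, 1 ≤ x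
instance (instructions : List Int) : Decidable (Pre_createSortedArray instructions) := by
  unfold Pre_createSortedArray; infer_instance

def pvWitness_createSortedArray : List Int := [1, 5, 6, 2]

def Spec_createSortedArray (instructions : List Int) (out : Int) : Prop :=
  out = createSortedArray_alt instructions
instance (instructions : List Int) (out : Int) : Decidable (Spec_createSortedArray instructions out) := by
  unfold Spec_createSortedArray; infer_instance

-- ===== CLAIM (what is proved, stated in full; the proofs are below) =====
def Claim_equal_createSortedArray : Prop := ∀ (instructions : List Int),
  Dom_createSortedArray instructions → Pre_createSortedArray instructions →
  Spec_createSortedArray instructions (createSortedArray instructions)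

-- ===== LEMMAS AND PROOFS =====

def pvLbN (m : Nat) : Nat := m - (m &&& (m - 1))

theorem pv_land_two_mul (u v : Nat) : (2 * u) &&& (2 * v + 1) = 2 * (u &&& v) := by
  apply Nat.eq_of_testBit_eq
  intro i
  cases i with
  | zero =>
    have h1 : 2 * u % 2 = 0 := by omega
    have h2 : 2 * (u &&& v) % 2 = 0 := by omega
    simp [Nat.testBit_zero, h1, h2]
  | succ i =>
    have h1 : 2 * u / 2 = u := by omega
    have h2 : (2 * v + 1) / 2 = v := by omega
    have h3 : 2 * (u &&& v) / 2 = u &&& v := by omega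
    rw [Nat.testBit_land]
    simp [Nat.testBit_add_one, h1, h2, h3]

theorem pv_land_odd_pred (c : Nat) : (2 * c + 1) &&& (2 * c) = 2 * c := by
  apply Nat.eq_of_testBit_eq
  intro i
  cases i with
  | zero =>
    have h1 : 2 * c % 2 = 0 := by omega
    simp [Nat.testBit_zero, h1]
  | succ i =>
    have h1 : (2 * c + 1) / 2 = c := by omega
    have h2 : 2 * c / 2 = c := by omega
    rw [Nat.testBit_land]
    simp [Nat.testBit_add_one, h1, h2]

theorem pv_land_shift (s x y : Nat) :
    (x * 2 ^ s) &&& (y * 2 ^ s + (2 ^ s - 1)) = (x &&& y) * 2 ^ s := by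
  induction s generalizing x y with
  | zero => simp
  | succ s ih =>
    have hp : 0 < 2 ^ s := Nat.pow_pos (by omega : (0:Nat) < 2)
    have e1 : x * 2 ^ (s + 1) = 2 * (x * 2 ^ s) := by ring
    have e2 : y * 2 ^ (s + 1) + (2 ^ (s + 1) - 1) = 2 * (y * 2 ^ s + (2 ^ s - 1)) + 1 := by
      have ha : y * 2 ^ (s + 1) = 2 * (y * 2 ^ s) := by ring
      have hb : 2 ^ (s + 1) = 2 * 2 ^ s := by ring
      omega
    rw [e1, e2, pv_land_two_mul, ih]
    ring

theorem pvLbN_odd_mul (c s : Nat) : pvLbN ((2 * c + 1) * 2 ^ s) = 2 ^ s := by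
  have hp : 0 < 2 ^ s := Nat.pow_pos (by omega : (0:Nat) < 2)
  have e1 : (2 * c + 1) * 2 ^ s - 1 = (2 * c) * 2 ^ s + (2 ^ s - 1) := by
    have : (2 * c + 1) * 2 ^ s = 2 * c * 2 ^ s + 2 ^ s := by ring
    omega
  unfold pvLbN
  rw [e1, pv_land_shift, pv_land_odd_pred]
  have : (2 * c + 1) * 2 ^ s = 2 * c * 2 ^ s + 2 ^ s := by ring
  omega

theorem pv_exists_odd_pow (m : Nat) (h : 0 < m) : ∃ c s, m = (2 * c + 1) * 2 ^ s := by
  obtain ⟨k, m', hodd, hm⟩ := Nat.exists_eq_two_pow_mul_odd (by omega : m ≠ 0)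
  obtain ⟨c, hc⟩ := hodd
  exact ⟨c, k, by rw [hm, hc]; ring⟩

theorem pvLow_coe (m : Nat) (h : 0 < m) : pvLow (m : Int) = (pvLbN m : Int) := by
  unfold pvLow PySem.Int.band
  rw [if_pos (by positivity), if_neg (by omega)]
  have e1 : ((m : Int)).toNat = m := Int.toNat_natCast m
  have e2 : (-(-(m : Int)) - 1).toNat = m - 1 := by omega
  rw [e1, e2]
  rfl

theorem pvLow_of_eq (n : Int) (c s : Nat) (h : n = (((2 * c + 1) * 2 ^ s : Nat) : Int)) :
    pvLow n = ((2 ^ s : Nat) : Int) := by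
  subst h
  rw [pvLow_coe _ (by positivity), pvLbN_odd_mul]

theorem pvLow_pos {n : Int} (h : 1 ≤ n) : 1 ≤ pvLow n ∧ pvLow n ≤ n := by
  obtain ⟨c, s, hcs⟩ := pv_exists_odd_pow n.toNat (by omega)
  have hn : n = (((2 * c + 1) * 2 ^ s : Nat) : Int) := by rw [← hcs]; omega
  rw [pvLow_of_eq n c s hn]
  have h1 : 0 < 2 ^ s := Nat.pow_pos (by omega : (0:Nat) < 2)
  have h2 : 2 ^ s ≤ (2 * c + 1) * 2 ^ s := Nat.le_mul_of_pos_left _ (by omega)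
  constructor
  · exact_mod_cast h1
  · rw [hn]; exact_mod_cast h2

theorem pvLow_gap {k r : Int} (hk : 1 ≤ k) (hr : 1 ≤ r) (h : r < pvLow k) :
    pvLow (k + r) = pvLow r := by
  obtain ⟨c, s, hcs⟩ := pv_exists_odd_pow k.toNat (by omega)
  have hkk : k = (((2 * c + 1) * 2 ^ s : Nat) : Int) := by rw [← hcs]; omega
  obtain ⟨b, t, hbt⟩ := pv_exists_odd_pow r.toNat (by omega)
  have hrr : r = (((2 * b + 1) * 2 ^ t : Nat) : Int) := by rw [← hbt]; omega
  rw [pvLow_of_eq k c s hkk] at h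
  have hts : t < s := by
    have h1 : 2 ^ t ≤ (2 * b + 1) * 2 ^ t := Nat.le_mul_of_pos_left _ (by omega)
    have h2 : (2 * b + 1) * 2 ^ t < 2 ^ s := by
      have h3 : (((2 * b + 1) * 2 ^ t : Nat) : Int) < ((2 ^ s : Nat) : Int) := by
        rw [← hrr]; exact h
      exact_mod_cast h3
    have : 2 ^ t < 2 ^ s := lt_of_le_of_lt h1 h2
    exact (Nat.pow_lt_pow_iff_right (by omega)).mp this
  obtain ⟨u, hu⟩ : ∃ u, s = t + 1 + u := ⟨s - t - 1, by omega⟩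
  have key : k + r = (((2 * ((2 * c + 1) * 2 ^ u + b) + 1) * 2 ^ t : Nat) : Int) := by
    rw [hkk, hrr, hu]
    push_cast
    ring
  rw [pvLow_of_eq _ _ _ key, pvLow_of_eq r b t hrr]

theorem pvLow_step {n : Int} (h : 1 ≤ n) : 2 * pvLow n ≤ pvLow (n + pvLow n) := by
  obtain ⟨c, s, hcs⟩ := pv_exists_odd_pow n.toNat (by omega)
  have hn : n = (((2 * c + 1) * 2 ^ s : Nat) : Int) := by rw [← hcs]; omega
  rw [pvLow_of_eq n c s hn]
  obtain ⟨d, u, hdu⟩ := pv_exists_odd_pow (c + 1) (by omega)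
  have he : (2 * c + 1) * 2 ^ s + 2 ^ s = (2 * d + 1) * 2 ^ (s + 1 + u) := by
    have e1 : (2 * c + 1) * 2 ^ s + 2 ^ s = 2 * (c + 1) * 2 ^ s := by ring
    rw [e1, hdu, pow_add, pow_succ]
    ring
  have key : n + ((2 ^ s : Nat) : Int) = (((2 * d + 1) * 2 ^ (s + 1 + u) : Nat) : Int) := by
    rw [hn]
    exact_mod_cast congrArg (fun (x : Nat) => (x : Int)) he
  rw [key, pvLow_of_eq _ d (s + 1 + u) rfl]
  have : 2 * 2 ^ s ≤ 2 ^ (s + 1 + u) := by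
    have : 2 ^ (s + 1) ≤ 2 ^ (s + 1 + u) := Nat.pow_le_pow_right (by omega) (by omega)
    have e : 2 ^ (s + 1) = 2 * 2 ^ s := by ring
    omega
  exact_mod_cast this



theorem pvCnt_cons (x : Int) (S : List Int) (p : Int → Bool) :
    ((x :: S).countP p : Int) = (S.countP p : Int) + (if p x then 1 else 0) := by
  rw [List.countP_cons]
  split_ifs <;> simp

theorem pvCnt_split (S : List Int) (a b : Int) (hab : a ≤ b) :
    (S.countP (fun y => decide (y ≤ b)) : Int)
      = (S.countP (fun y => decide (y ≤ a)) : Int)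
        + (S.countP (fun y => decide (a < y) && decide (y ≤ b)) : Int) := by
  induction S with
  | nil => simp
  | cons x S ih =>
    rw [pvCnt_cons, pvCnt_cons, pvCnt_cons, ih]
    by_cases h1 : x ≤ a <;> by_cases h2 : x ≤ b <;> by_cases h3 : a < x <;>
      simp [h1, h2, h3] <;> omega

theorem pvCnt_compl (S : List Int) (v : Int) :
    (S.countP (fun y => decide (v < y)) : Int)
      = (S.length : Int) - (S.countP (fun y => decide (y ≤ v)) : Int) := by
  induction S with
  | nil => simp
  | cons x S ih =>
    rw [pvCnt_cons, pvCnt_cons]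
    by_cases h : v < x
    · simp only [ih, List.length_cons]
      simp [h, show ¬ x ≤ v by omega]
      ring
    · simp only [ih, List.length_cons]
      simp [h, show x ≤ v by omega]

theorem pvCnt_zero (S : List Int) (v : Int) (hS : ∀ y ∈ S, 1 ≤ y) (hv : v ≤ 0) :
    (S.countP (fun y => decide (y ≤ v)) : Int) = 0 := by
  rw [List.countP_eq_zero.mpr]
  · rfl
  · intro y hy
    have := hS y hy
    simp
    omega

def pvInv (maxVal : Int) (S : List Int) (c : PySem.Dict Int Int) : Prop :=
  ∀ k : Int, 1 ≤ k → k ≤ maxVal →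
    c.getD k 0 = (S.countP (fun y => decide (k - pvLow k < y) && decide (y ≤ k)) : Int)

theorem pvQuery_eq (maxVal : Int) (S : List Int) (c : PySem.Dict Int Int)
    (hInv : pvInv maxVal S c) (hS : ∀ y ∈ S, 1 ≤ y) :
    ∀ (fuel : Nat) (q acc : Int), 0 ≤ q → q ≤ maxVal → q.toNat ≤ fuel →
      pvQuery c fuel q acc = acc + (S.countP (fun y => decide (y ≤ q)) : Int) := by
  intro fuel
  induction fuel with
  | zero =>
    intro q acc h0 hm hf
    have hq : q = 0 := by omega
    subst hq
    rw [pvCnt_zero S 0 hS (by omega)]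
    simp [pvQuery]
  | succ fuel ih =>
    intro q acc h0 hm hf
    by_cases hq : 0 < q
    · have hlow := pvLow_pos (n := q) (by omega)
      rw [pvQuery, if_pos hq, ih (q - pvLow q) _ (by omega) (by omega) (by omega),
          hInv q (by omega) hm, pvCnt_split S (q - pvLow q) q (by omega)]
      ring
    · have hq0 : q = 0 := by omega
      subst hq0
      rw [pvCnt_zero S 0 hS (by omega)]
      simp [pvQuery]

theorem pvAdd_getD (maxVal x : Int) (hx : 1 ≤ x) :
    ∀ (fuel : Nat) (num : Int) (c : PySem.Dict Int Int) (k : Int),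
      x ≤ num → num - pvLow num < x → 1 ≤ k → k ≤ maxVal →
      (maxVal + 1 - num).toNat ≤ fuel →
      (pvAdd maxVal fuel num c).getD k 0
        = c.getD k 0 + (if num ≤ k ∧ k - pvLow k < x then 1 else 0) := by
  intro fuel
  induction fuel with
  | zero =>
    intro num c k hxn hnl hk1 hkm hf
    have : ¬ num ≤ k := by omega
    rw [pvAdd, if_neg (by omega : ¬ (num ≤ k ∧ k - pvLow k < x))]
    ring
  | succ fuel ih =>
    intro num c k hxn hnl hk1 hkm hf
    have hnum1 : 1 ≤ num := by omega
    have hlow := pvLow_pos (n := num) hnum1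
    by_cases hle : num ≤ maxVal
    · rw [pvAdd, if_pos hle]
      have hstep := pvLow_step (n := num) hnum1
      have hlow' := pvLow_pos (n := num + pvLow num) (by omega)
      rw [ih (num + pvLow num) _ k (by omega) (by omega) hk1 hkm (by omega)]
      rw [PySem.Dict.getD_modify]
      by_cases hkn : k = num
      · subst hkn
        rw [if_pos rfl, if_neg (by omega : ¬ (k + pvLow k ≤ k ∧ k - pvLow k < x)),
            if_pos (by omega : k ≤ k ∧ k - pvLow k < x)]
        ring
      · rw [if_neg hkn]
        congr 1
        by_cases hnk : num ≤ k
        · have hklt : num < k := by omega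
          by_cases hgap : k < num + pvLow num
          · -- k strictly between consecutive path points: k - pvLow k ≥ num ≥ x
            have hr : pvLow (num + (k - num)) = pvLow (k - num) :=
              pvLow_gap hnum1 (by omega) (by omega)
            rw [(by omega : num + (k - num) = k)] at hr
            have hrl := pvLow_pos (n := k - num) (by omega)
            rw [if_neg (by omega : ¬ (num + pvLow num ≤ k ∧ k - pvLow k < x)),
                if_neg (by omega : ¬ (num ≤ k ∧ k - pvLow k < x))]
          · have hge : num + pvLow num ≤ k := by omega
            by_cases hc : k - pvLow k < x
            · rw [if_pos ⟨hge, hc⟩, if_pos ⟨hnk, hc⟩]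
            · rw [if_neg (fun h => hc h.2), if_neg (fun h => hc h.2)]
        · rw [if_neg (by omega : ¬ (num + pvLow num ≤ k ∧ k - pvLow k < x)),
              if_neg (by omega : ¬ (num ≤ k ∧ k - pvLow k < x))]
    · rw [pvAdd, if_neg hle, if_neg (by omega : ¬ (num ≤ k ∧ k - pvLow k < x))]
      ring

theorem pvInv_add (maxVal x : Int) (S : List Int) (c : PySem.Dict Int Int)
    (hx1 : 1 ≤ x) (h : pvInv maxVal S c) :
    pvInv maxVal (x :: S) (pvAdd maxVal (maxVal + 1 - x).toNat x c) := by
  intro k hk1 hkm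
  have hlx := pvLow_pos (n := x) hx1
  rw [pvAdd_getD maxVal x hx1 _ x c k le_rfl (by omega) hk1 hkm le_rfl,
      h k hk1 hkm, pvCnt_cons]
  congr 1
  by_cases h1 : k - pvLow k < x <;> by_cases h2 : x ≤ k <;> simp [h1, h2]

theorem pvCnt_rot (x : Int) (S : List Int) (p : Int → Bool) :
    (S ++ [x]).countP p = (x :: S).countP p := by
  simp [List.countP_append, List.countP_cons]

theorem pvInv_rot (maxVal x : Int) (S : List Int) (c : PySem.Dict Int Int)
    (h : pvInv maxVal (x :: S) c) : pvInv maxVal (S ++ [x]) c := by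
  intro k hk1 hkm
  rw [h k hk1 hkm, pvCnt_rot]

theorem pvMain (maxVal : Int) (instructions : List Int)
    (hb : ∀ y ∈ instructions, 1 ≤ y ∧ y ≤ maxVal) :
    ∀ (rest pre : List Int) (c : PySem.Dict Int Int) (acc : Int),
      instructions = pre ++ rest → pvInv maxVal pre c →
      ((PySem.List.enumerate rest (pre.length : Int)).foldl
        (fun (st : PySem.Dict Int Int × Int) p =>
          let c := pvAdd maxVal (maxVal + 1 - p.2).toNat p.2 st.1
          (c, st.2 + min (pvQuery c (p.2 - 1).toNat (p.2 - 1) 0)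
                         ((p.1 + 1) - pvQuery c p.2.toNat p.2 0)))
        (c, acc)).2
      = (PySem.List.enumerate rest (pre.length : Int)).foldl
          (fun (acc : Int) p =>
            let pfx := PySem.List.slice instructions (some 0) (some p.1)
            acc + min ((pfx.countP (fun x => decide (x < p.2)) : Int))
                      ((pfx.countP (fun x => decide (p.2 < x)) : Int)))
          acc := by
  intro rest
  induction rest with
  | nil => intro pre c acc _ _; simp [PySem.List.enumerate]
  | cons num rest' ih =>
    intro pre c acc hsplit hInv
    have hmem : num ∈ instructions := by rw [hsplit]; simp
    have hnum := hb num hmem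
    have hS' : ∀ y ∈ num :: pre, 1 ≤ y := by
      intro y hy
      rcases List.mem_cons.mp hy with h | h
      · omega
      · exact (hb y (by rw [hsplit]; exact List.mem_append_left _ h)).1
    set c' := pvAdd maxVal (maxVal + 1 - num).toNat num c with hc'
    have hInv' : pvInv maxVal (num :: pre) c' :=
      pvInv_add maxVal num pre c (by omega) hInv
    have hcongr : pre.countP (fun y => decide (y ≤ num - 1)) = pre.countP (fun y => decide (y < num)) :=
      List.countP_congr (by intro a _; simp)
    have e1 : pvQuery c' (num - 1).toNat (num - 1) 0 = (pre.countP (fun x => decide (x < num)) : Int) := by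
      rw [pvQuery_eq maxVal (num :: pre) c' hInv' hS' (num - 1).toNat (num - 1) 0 (by omega) (by omega) le_rfl,
          pvCnt_cons, if_neg (by simp), hcongr]
      ring
    have e2 : (pre.length : Int) + 1 - pvQuery c' num.toNat num 0 = (pre.countP (fun x => decide (num < x)) : Int) := by
      rw [pvQuery_eq maxVal (num :: pre) c' hInv' hS' num.toNat num 0 (by omega) (by omega) le_rfl,
          pvCnt_cons, if_pos (by simp), pvCnt_compl pre num]
      ring
    rw [PySem.List.enumerate_cons, List.foldl_cons, List.foldl_cons]
    dsimp only
    rw [e1, e2, PySem.List.slice_zero_start, PySem.List.slice_to_natCast, hsplit, List.take_left]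
    have hlen : ((pre ++ [num]).length : Int) = (pre.length : Int) + 1 := by
      simp
    rw [← hsplit, ← hlen]
    exact ih (pre ++ [num]) c' _
      (by rw [hsplit]; simp)
      (pvInv_rot maxVal num pre c' hInv')

-- ===== VERDICT (by name: the statement is the Claim_ definition above) =====
theorem createSortedArray_spec : Claim_equal_createSortedArray := by
  intro instructions hdom hpre
  unfold Spec_createSortedArray createSortedArray createSortedArray_alt
  obtain ⟨hne, hpos⟩ := hpre
  cases hmax : PySem.List.max? instructions (fun x => x) with
  | none => exact absurd ((PySem.List.max?_eq_none_iff _ _).mp hmax) hne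
  | some maxVal =>
    have hb : ∀ y ∈ instructions, 1 ≤ y ∧ y ≤ maxVal := fun y hy =>
      ⟨hpos y hy, PySem.List.max?_isMax hmax y hy⟩
    have hmain := pvMain maxVal instructions hb instructions [] PySem.Dict.empty 0
      (by simp)
      (by intro k _ _; rw [PySem.Dict.getD_empty]; simp)
    simp only [List.length_nil, Nat.cast_zero] at hmain
    dsimp only
    rw [hmain]
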